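-- pv_equiv track=rewrite | github.com/cggar98/ViscAI | ViscAI/ViscAI_gui/dat_help_generator.py | generate_help_text
-- ===== SOURCE A (Python) =====
-- def generate_help_text(parsed):
--     """
--     Genera un help_line dinámico basado en la estructura parseada.
--     """
--     H = []
--
--     # Las primeras 6 líneas son siempre las mismas
--     H.append("**LINE 1**\nMaximum number of polymers | Maximum number of segments")
--     H.append("**LINE 2**\nDynamic dilation exponent α")
--     H.append("**LINE 3**\nFine tuning parameter (1 = stored values)")
--     H.append("**LINE 4**\nMonomer mass (g/mol) | Monomers per entangled segment | Density (g/cm³)")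
--     H.append("**LINE 5**\nEntanglement time (s) | Temperature (K)")
--     H.append("**LINE 6**\nNumber of components")
--
--     # Ahora los componentes
--     index_line = 7
--
--     for i, comp in enumerate(parsed["components"], start=1):
--         H.append(f"**LINE {index_line}**\nComponent {i}: weight fraction")
--         index_line += 1
--
--         H.append(f"**LINE {index_line}**\nNum polymers | Polymer type")
--         index_line += 1
--
--         p = comp["poly_type"]
--
--         ### Aquí generamos la ayuda según el tipo ###
--         if p == 0:
--             H.append(f"**LINE {index_line}**\nDistribution type | Mw (g/mol) | PDI")
--             index_line += 1
--
--         elif p == 1: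
--             H.append(f"**LINE {index_line}**\nDistribution | Mw (arm) | PDI")
--             index_line += 1
--             H.append(f"**LINE {index_line}**\nNumber of arms")
--             index_line += 1
--
--         elif p == 2:
--             H.append(f"**LINE {index_line}** (Symmetric arms)\nDistribution | Mw | PDI")
--             index_line += 1
--             H.append(f"**LINE {index_line}** (Asymmetric arm)\nDistribution | Mw | PDI")
--             index_line += 1
--
--         elif p == 3:
--             H.append(f"**LINE {index_line}** (Side arms)\nDistribution | Mw | PDI")
--             index_line += 1
--             H.append(f"**LINE {index_line}** (Crossbar)\nDistribution | Mw | PDI")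
--             index_line += 1
--
--         # Complete the rest of the polymers type
--
--     return "\n\n".join(H)
-- ===== SOURCE B (Python) =====
-- # B: table-driven decomposition — build (suffix, body) entries per component via a
-- # dispatch dict, then number them all in one enumerate pass starting at 7.
--
-- _FIXED_BODIES = [
--     "Maximum number of polymers | Maximum number of segments",
--     "Dynamic dilation exponent α",
--     "Fine tuning parameter (1 = stored values)",
--     "Monomer mass (g/mol) | Monomers per entangled segment | Density (g/cm³)",
--     "Entanglement time (s) | Temperature (K)",
--     "Number of components",
-- ]
--
-- _POLY_TABLE = {
--     0: [("", "Distribution type | Mw (g/mol) | PDI")],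
--     1: [("", "Distribution | Mw (arm) | PDI"), ("", "Number of arms")],
--     2: [(" (Symmetric arms)", "Distribution | Mw | PDI"),
--         (" (Asymmetric arm)", "Distribution | Mw | PDI")],
--     3: [(" (Side arms)", "Distribution | Mw | PDI"),
--         (" (Crossbar)", "Distribution | Mw | PDI")],
-- }
--
--
-- def generate_help_text(parsed):
--     entries = []
--     for i, comp in enumerate(parsed["components"], start=1):
--         entries.append(("", f"Component {i}: weight fraction"))
--         entries.append(("", "Num polymers | Polymer type"))
--         entries.extend(_POLY_TABLE.get(comp["poly_type"], []))
--     head = [f"**LINE {n}**\n{b}" for n, b in enumerate(_FIXED_BODIES, start=1)]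
--     tail = [f"**LINE {n}**{s}\n{b}" for n, (s, b) in enumerate(entries, start=7)]
--     return "\n\n".join(head + tail)
-- ===== Notes on version B (the rewrite author's own statement) =====
-- stated objective: alternative
-- what changed: B drops A's running index_line counter and per-type if/elif string appends: it builds a flat list of (suffix, body) entries via a dispatch table keyed on poly_type, then numbers all entries in a single enumerate pass starting at 7 before joining.
import Mathlib
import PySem

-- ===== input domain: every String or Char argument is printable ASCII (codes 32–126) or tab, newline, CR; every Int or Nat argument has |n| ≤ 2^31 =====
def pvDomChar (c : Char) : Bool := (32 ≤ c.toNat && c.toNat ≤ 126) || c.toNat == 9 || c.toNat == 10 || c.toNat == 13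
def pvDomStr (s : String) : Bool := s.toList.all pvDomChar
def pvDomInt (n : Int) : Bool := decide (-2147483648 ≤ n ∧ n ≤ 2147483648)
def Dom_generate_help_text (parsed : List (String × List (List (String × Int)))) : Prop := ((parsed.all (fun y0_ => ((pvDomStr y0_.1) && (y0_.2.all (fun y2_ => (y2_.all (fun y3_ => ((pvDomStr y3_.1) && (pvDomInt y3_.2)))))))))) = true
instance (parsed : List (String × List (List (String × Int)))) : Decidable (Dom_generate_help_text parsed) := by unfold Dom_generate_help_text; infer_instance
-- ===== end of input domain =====

-- B replaces A's running index_line counter and per-type if/elif appends by a dispatch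
-- table of (suffix, body) entries and a single enumerate pass numbering them from 7
-- (objective: alternative decomposition; return value identical on Pre_).

-- ===== PORT A =====
-- one loop iteration of A: appends 2 fixed lines then the per-poly_type lines, tracking index_line
def ghtStepA (acc : List String × Int) (ic : Int × List (String × Int)) : List String × Int :=
  let H := acc.1
  let idx := acc.2
  let i := ic.1
  let comp := ic.2
  let H := H ++ ["**LINE " ++ PySem.Int.toStr idx ++ "**\nComponent " ++ PySem.Int.toStr i ++ ": weight fraction"]
  let idx := idx + 1
  let H := H ++ ["**LINE " ++ PySem.Int.toStr idx ++ "**\nNum polymers | Polymer type"]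
  let idx := idx + 1
  let p := ((PySem.Dict.mk comp).get? "poly_type").getD (-1)   -- Pre_ guarantees the key exists (Python raises KeyError otherwise)
  if p == 0 then
    (H ++ ["**LINE " ++ PySem.Int.toStr idx ++ "**\nDistribution type | Mw (g/mol) | PDI"], idx + 1)
  else if p == 1 then
    (H ++ ["**LINE " ++ PySem.Int.toStr idx ++ "**\nDistribution | Mw (arm) | PDI",
           "**LINE " ++ PySem.Int.toStr (idx + 1) ++ "**\nNumber of arms"], idx + 2)
  else if p == 2 then
    (H ++ ["**LINE " ++ PySem.Int.toStr idx ++ "** (Symmetric arms)\nDistribution | Mw | PDI",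
           "**LINE " ++ PySem.Int.toStr (idx + 1) ++ "** (Asymmetric arm)\nDistribution | Mw | PDI"], idx + 2)
  else if p == 3 then
    (H ++ ["**LINE " ++ PySem.Int.toStr idx ++ "** (Side arms)\nDistribution | Mw | PDI",
           "**LINE " ++ PySem.Int.toStr (idx + 1) ++ "** (Crossbar)\nDistribution | Mw | PDI"], idx + 2)
  else (H, idx)

def generate_help_text (parsed : List (String × List (List (String × Int)))) : String :=
  let H : List String :=
    ["**LINE 1**\nMaximum number of polymers | Maximum number of segments",
     "**LINE 2**\nDynamic dilation exponent α",
     "**LINE 3**\nFine tuning parameter (1 = stored values)",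
     "**LINE 4**\nMonomer mass (g/mol) | Monomers per entangled segment | Density (g/cm³)",
     "**LINE 5**\nEntanglement time (s) | Temperature (K)",
     "**LINE 6**\nNumber of components"]
  let comps := ((PySem.Dict.mk parsed).get? "components").getD []   -- Pre_ guarantees the key exists
  let res := (PySem.List.enumerate comps 1).foldl ghtStepA (H, 7)
  PySem.Str.join "\n\n" res.1

-- ===== PORT B =====
def ghtFixedBodies : List String :=
  ["Maximum number of polymers | Maximum number of segments",
   "Dynamic dilation exponent α",
   "Fine tuning parameter (1 = stored values)",
   "Monomer mass (g/mol) | Monomers per entangled segment | Density (g/cm³)",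
   "Entanglement time (s) | Temperature (K)",
   "Number of components"]

-- _POLY_TABLE.get(p, []) from Source B
def ghtTable (p : Int) : List (String × String) :=
  if p == 0 then [("", "Distribution type | Mw (g/mol) | PDI")]
  else if p == 1 then [("", "Distribution | Mw (arm) | PDI"), ("", "Number of arms")]
  else if p == 2 then [(" (Symmetric arms)", "Distribution | Mw | PDI"),
                       (" (Asymmetric arm)", "Distribution | Mw | PDI")]
  else if p == 3 then [(" (Side arms)", "Distribution | Mw | PDI"),
                       (" (Crossbar)", "Distribution | Mw | PDI")]
  else []

def generate_help_text_alt (parsed : List (String × List (List (String × Int)))) : String :=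
  let comps := ((PySem.Dict.mk parsed).get? "components").getD []   -- Pre_ guarantees the key exists
  let entries : List (String × String) :=
    (PySem.List.enumerate comps 1).foldl
      (fun es ic =>
        es ++ [("", "Component " ++ PySem.Int.toStr ic.1 ++ ": weight fraction"),
               ("", "Num polymers | Polymer type")]
           ++ ghtTable (((PySem.Dict.mk ic.2).get? "poly_type").getD (-1))) []
  let head := (PySem.List.enumerate ghtFixedBodies 1).map
      (fun nb => "**LINE " ++ PySem.Int.toStr nb.1 ++ "**\n" ++ nb.2)
  let tail := (PySem.List.enumerate entries 7).map
      (fun ne => "**LINE " ++ PySem.Int.toStr ne.1 ++ "**" ++ ne.2.1 ++ "\n" ++ ne.2.2)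
  PySem.Str.join "\n\n" (head ++ tail)

-- ===== PRECONDITION & SPEC =====
-- Pre_ excludes exactly the inputs where Python A raises KeyError: a missing
-- "components" key, or a component dict without a "poly_type" key.
def Pre_generate_help_text (parsed : List (String × List (List (String × Int)))) : Prop :=
  ∃ comps, (PySem.Dict.mk parsed).get? "components" = some comps ∧
    ∀ comp ∈ comps, ((PySem.Dict.mk comp).get? "poly_type").isSome
instance (parsed : List (String × List (List (String × Int)))) : Decidable (Pre_generate_help_text parsed) := by unfold Pre_generate_help_text; infer_instance

def pvWitness_generate_help_text : (List (String × List (List (String × Int)))) :=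
  [("components", [[("poly_type", 1)], [("poly_type", 5)]])]

def Spec_generate_help_text (parsed : List (String × List (List (String × Int)))) (out : String) : Prop := out = generate_help_text_alt parsed
instance (parsed : List (String × List (List (String × Int)))) (out : String) : Decidable (Spec_generate_help_text parsed out) := by unfold Spec_generate_help_text; infer_instance

-- ===== CLAIM (what is proved, stated in full; the proofs are below) =====
def Claim_equal_generate_help_text : Prop := ∀ (parsed : List (String × List (List (String × Int)))), Dom_generate_help_text parsed → Pre_generate_help_text parsed → Spec_generate_help_text parsed (generate_help_text parsed)

-- ===== LEMMAS AND PROOFS =====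

-- per-component entry list (proof-side characterisation shared by both ports)
def ghtPerComp (i : Int) (comp : List (String × Int)) : List (String × String) :=
  [("", "Component " ++ PySem.Int.toStr i ++ ": weight fraction"),
   ("", "Num polymers | Polymer type")]
  ++ ghtTable (((PySem.Dict.mk comp).get? "poly_type").getD (-1))

def ghtEntriesR (i : Int) : List (List (String × Int)) → List (String × String)
  | [] => []
  | c :: cs => ghtPerComp i c ++ ghtEntriesR (i + 1) cs

def ghtRenderR (n : Int) : List (String × String) → List String
  | [] => []
  | e :: es => ("**LINE " ++ PySem.Int.toStr n ++ "**" ++ e.1 ++ "\n" ++ e.2) :: ghtRenderR (n + 1) es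

theorem ghtRenderR_append (xs ys : List (String × String)) (n : Int) :
    ghtRenderR n (xs ++ ys) = ghtRenderR n xs ++ ghtRenderR (n + xs.length) ys := by
  induction xs generalizing n with
  | nil => simp [ghtRenderR]
  | cons x xs ih =>
      simp [ghtRenderR, ih, List.length_cons]
      rw [show n + (↑xs.length + 1) = n + 1 + ↑xs.length by ring]

theorem ght_str_split (a b c x : String) (h : c = a ++ b) : c ++ x = a ++ (b ++ x) := by
  subst h; rw [String.append_assoc]

theorem ghtStepA_eq (H : List String) (n i : Int) (comp : List (String × Int)) :
    ghtStepA (H, n) (i, comp)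
      = (H ++ ghtRenderR n (ghtPerComp i comp), n + (ghtPerComp i comp).length) := by
  simp only [ghtStepA, ghtPerComp, ghtTable]
  split_ifs <;> simp [ghtRenderR, String.append_assoc] <;> ring_nf <;>
    exact ⟨ght_str_split "**\n" "Component " _ _ rfl, trivial⟩

theorem ghtFoldA (comps : List (List (String × Int))) (H : List String) (i n : Int) :
    (PySem.List.enumerate comps i).foldl ghtStepA (H, n)
      = (H ++ ghtRenderR n (ghtEntriesR i comps), n + (ghtEntriesR i comps).length) := by
  induction comps generalizing H i n with
  | nil => simp [PySem.List.enumerate_nil, ghtEntriesR, ghtRenderR]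
  | cons c cs ih =>
      rw [PySem.List.enumerate_cons]
      simp only [List.foldl_cons, ghtStepA_eq, ih, ghtEntriesR, ghtRenderR_append,
        Prod.mk.injEq, List.length_append]
      refine ⟨by simp [List.append_assoc], by push_cast; ring⟩

theorem ghtFoldB (comps : List (List (String × Int))) (es : List (String × String)) (i : Int) :
    (PySem.List.enumerate comps i).foldl
      (fun es ic =>
        es ++ [("", "Component " ++ PySem.Int.toStr ic.1 ++ ": weight fraction"),
               ("", "Num polymers | Polymer type")]
           ++ ghtTable (((PySem.Dict.mk ic.2).get? "poly_type").getD (-1))) es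
      = es ++ ghtEntriesR i comps := by
  induction comps generalizing es i with
  | nil => simp [PySem.List.enumerate_nil, ghtEntriesR]
  | cons c cs ih =>
      rw [PySem.List.enumerate_cons, List.foldl_cons, ih]
      simp [ghtEntriesR, ghtPerComp, List.append_assoc]

theorem ghtMapRender (es : List (String × String)) (n : Int) :
    (PySem.List.enumerate es n).map
      (fun ne => "**LINE " ++ PySem.Int.toStr ne.1 ++ "**" ++ ne.2.1 ++ "\n" ++ ne.2.2)
      = ghtRenderR n es := by
  induction es generalizing n with
  | nil => simp [PySem.List.enumerate_nil, ghtRenderR]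
  | cons e es ih => rw [PySem.List.enumerate_cons]; simp [ghtRenderR, ih]

-- ===== VERDICT (by name: the statement is the Claim_ definition above) =====
theorem generate_help_text_spec : Claim_equal_generate_help_text := by
  intro parsed _ _
  show generate_help_text parsed = generate_help_text_alt parsed
  simp only [generate_help_text, generate_help_text_alt, ghtFoldA, ghtFoldB, ghtMapRender,
    List.nil_append]
  congr 1
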